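-- pv_equiv track=rewrite | github.com/FlyingMedusa/PythonELTIT | Homeworks/039_pig_latin.py | punct_removal
-- ===== SOURCE A (Python) =====
-- def punct_removal(word):
--     punct = '.,?!()<>'
--     punc_leftovers = ''
--     for i in word:
--         if i in punct:
--             punc_leftovers += i
--         else:
--             break
--     return punc_leftovers
-- ===== SOURCE B (Python) =====
-- import re
--
-- _LEAD_PUNCT = re.compile(r'^[.,?!()<>]*')
--
-- def punct_removal(word):
--     return _LEAD_PUNCT.match(word).group()
-- ===== Notes on version B (the rewrite author's own statement) =====
-- stated objective: idiomatic
-- what changed: The explicit char-by-char loop with break and string accumulation is replaced by a single precompiled regex match of ^[.,?!()<>]* whose group is the leading punctuation run.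
import Mathlib
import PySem

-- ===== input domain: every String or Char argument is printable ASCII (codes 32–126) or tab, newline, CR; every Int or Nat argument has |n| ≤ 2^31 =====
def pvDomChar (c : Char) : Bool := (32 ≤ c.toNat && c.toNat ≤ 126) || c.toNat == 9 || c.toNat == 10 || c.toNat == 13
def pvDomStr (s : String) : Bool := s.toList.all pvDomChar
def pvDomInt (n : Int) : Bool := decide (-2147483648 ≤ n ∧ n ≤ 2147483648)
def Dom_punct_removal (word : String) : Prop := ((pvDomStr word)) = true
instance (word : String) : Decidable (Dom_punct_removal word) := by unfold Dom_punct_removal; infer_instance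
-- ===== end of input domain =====

-- B replaces A's explicit scan-and-break loop by an idiomatic regex match ^[.,?!()<>]* (ported as takeWhile over the char class); same cost.


-- ===== PORT A =====
-- 'i in punct' for the single char i: membership in the chars of ".,?!()<>" (exact for length-1 needles)
def pvPunctChars : List Char := ".,?!()<>".toList

-- the for-loop with break: recursion over the chars, accumulating punc_leftovers
def punct_removal_loop : List Char → String → String
  | [], acc => acc
  | c :: cs, acc =>
    if pvPunctChars.contains c then punct_removal_loop cs (acc ++ c.toString) else acc

def punct_removal (word : String) : String :=
  punct_removal_loop word.toList ""

-- ===== PORT B =====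
-- regex match of ^[.,?!()<>]* : the maximal leading run of class chars = takeWhile membership
def punct_removal_alt (word : String) : String :=
  String.ofList (word.toList.takeWhile (fun c => pvPunctChars.contains c))

-- ===== PRECONDITION & SPEC =====
def Spec_punct_removal (word : String) (out : String) : Prop := out = punct_removal_alt word
instance (word : String) (out : String) : Decidable (Spec_punct_removal word out) := by unfold Spec_punct_removal; infer_instance

-- ===== CLAIM (what is proved, stated in full; the proofs are below) =====
def Claim_equal_punct_removal : Prop := ∀ (word : String), Dom_punct_removal word → Spec_punct_removal word (punct_removal word)

-- ===== LEMMAS AND PROOFS =====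
theorem punct_removal_loop_eq (l : List Char) (acc : String) :
    (punct_removal_loop l acc).toList = acc.toList ++ l.takeWhile (fun c => pvPunctChars.contains c) := by
  induction l generalizing acc with
  | nil => simp [punct_removal_loop]
  | cons c cs ih =>
    simp only [punct_removal_loop]
    by_cases h : c ∈ pvPunctChars
    · simp [h, ih, Char.toString]
    · simp [h]

-- ===== VERDICT (by name: the statement is the Claim_ definition above) =====
theorem punct_removal_spec : Claim_equal_punct_removal := by
  intro word _
  unfold Spec_punct_removal punct_removal punct_removal_alt
  apply String.toList_inj.mp
  simp [punct_removal_loop_eq]
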